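-- pv_equiv track=rewrite | github.com/is716652/agent | UI/app.py | _contains_any
-- ===== SOURCE A (Python) =====
-- def _contains_any(text: str, keywords: list[str]) -> bool:
--     if not keywords:
--         return False
--     t = text.lower()
--     for k in keywords:
--         k = (k or '').strip()
--         if not k:
--             continue
--         if k.lower() in t:
--             return True
--     return False
-- ===== SOURCE B (Python) =====
-- def _contains_any(text: str, keywords: list[str]) -> bool:
--     # Clean keywords once (strip + lower, drop blanks), then scan the text
--     # left to right a single position at a time, testing all cleaned keywords
--     # at once with startswith(tuple, i).
--     ks = [k.strip().lower() for k in keywords]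
--     ks = tuple(k for k in ks if k)
--     if not ks:
--         return False
--     t = text.lower()
--     for i in range(len(t)):
--         if t.startswith(ks, i):
--             return True
--     return False
-- ===== Notes on version B (the rewrite author's own statement) =====
-- stated objective: alternative
-- what changed: B normalises the keyword list once (strip+lower, blanks dropped) and then makes a single text-driven scan, testing every cleaned keyword with startswith at each position, instead of A's keyword-driven loop doing a separate 'in' substring search per keyword.
import Mathlib
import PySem

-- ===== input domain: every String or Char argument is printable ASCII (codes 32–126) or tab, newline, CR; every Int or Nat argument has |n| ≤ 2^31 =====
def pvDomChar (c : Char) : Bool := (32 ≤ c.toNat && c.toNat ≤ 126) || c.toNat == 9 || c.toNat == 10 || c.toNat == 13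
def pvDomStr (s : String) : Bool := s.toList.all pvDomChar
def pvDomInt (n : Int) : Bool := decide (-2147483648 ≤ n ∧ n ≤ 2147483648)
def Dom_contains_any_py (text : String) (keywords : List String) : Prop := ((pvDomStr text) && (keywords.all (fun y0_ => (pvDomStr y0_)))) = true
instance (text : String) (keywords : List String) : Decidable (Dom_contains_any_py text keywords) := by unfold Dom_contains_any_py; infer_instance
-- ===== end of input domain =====

-- B cleans the keyword list once (strip+lower, drop blanks) and makes a single
-- text-driven scan testing every cleaned keyword at each position (alternative
-- decomposition; A loops per keyword with a separate substring search).


-- ===== PORT A =====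
-- A's per-keyword loop: strip the keyword, skip blanks, test `k.lower() in t`.
def containsAnyGoA (t : List Char) : List String → Bool
  | [] => false
  | k :: rest =>
    let k' := PySem.Chars.strip k.toList
    if k'.isEmpty then containsAnyGoA t rest
    else if PySem.Chars.isIn (PySem.Chars.lower k') t then true
    else containsAnyGoA t rest

def contains_any_py (text : String) (keywords : List String) : Bool :=
  if keywords.isEmpty then false
  else containsAnyGoA (PySem.Chars.lower text.toList) keywords

-- ===== PORT B =====
-- B's cleaned keyword list: [k.strip().lower() for k in keywords], blanks dropped.
def cleanKeywords (keywords : List String) : List (List Char) :=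
  ((keywords.map (fun k => PySem.Chars.lower (PySem.Chars.strip k.toList))).filter
    (fun k => !k.isEmpty))

-- B's text-driven scan: at each position of t, test all cleaned keywords with startswith.
def scanAny (ks : List (List Char)) : List Char → Bool
  | [] => false
  | c :: rest => ks.any (fun k => PySem.Chars.startswith (c :: rest) k) || scanAny ks rest

def contains_any_py_alt (text : String) (keywords : List String) : Bool :=
  let ks := cleanKeywords keywords
  if ks.isEmpty then false
  else scanAny ks (PySem.Chars.lower text.toList)

-- ===== PRECONDITION & SPEC =====
def Spec_contains_any_py (text : String) (keywords : List String) (out : Bool) : Prop := out = contains_any_py_alt text keywords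
instance (text : String) (keywords : List String) (out : Bool) : Decidable (Spec_contains_any_py text keywords out) := by unfold Spec_contains_any_py; infer_instance

-- ===== CLAIM (what is proved, stated in full; the proofs are below) =====
def Claim_equal_contains_any_py : Prop := ∀ (text : String) (keywords : List String), Dom_contains_any_py text keywords → Spec_contains_any_py text keywords (contains_any_py text keywords)

-- ===== LEMMAS AND PROOFS =====

-- A's loop answers: some keyword from the cleaned list is a substring of t.
theorem containsAnyGoA_eq (t : List Char) (kws : List String) :
    containsAnyGoA t kws = (cleanKeywords kws).any (fun k => PySem.Chars.isIn k t) := by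
  induction kws with
  | nil => simp [containsAnyGoA, cleanKeywords]
  | cons k rest ih =>
    by_cases h : (PySem.Chars.strip k.toList).isEmpty
    · have hl : (PySem.Chars.lower (PySem.Chars.strip k.toList)).isEmpty := by
        simp [List.isEmpty_iff] at h ⊢
        simp [h, PySem.Chars.lower]
      simp [containsAnyGoA, cleanKeywords, h, hl, ih, cleanKeywords]
    · have hl : ¬ (PySem.Chars.lower (PySem.Chars.strip k.toList)).isEmpty := by
        simp [List.isEmpty_iff] at h ⊢
        simpa [PySem.Chars.lower] using h
      simp only [containsAnyGoA, cleanKeywords, List.map_cons, List.filter_cons]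
      rw [ih]
      simp [h, hl, cleanKeywords]

-- B's scan answers: some keyword from ks (all nonempty) is a substring of t.
theorem scanAny_eq_true_iff (ks : List (List Char)) (t : List Char)
    (hne : ∀ k ∈ ks, k ≠ []) :
    scanAny ks t = true ↔ ∃ k ∈ ks, k <:+: t := by
  induction t with
  | nil =>
    simp only [scanAny, Bool.false_eq_true, false_iff]
    rintro ⟨k, hk, hinf⟩
    exact hne k hk (List.eq_nil_of_infix_nil hinf)
  | cons c rest ih =>
    simp only [scanAny, Bool.or_eq_true, List.any_eq_true, PySem.Chars.startswith_iff, ih]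
    constructor
    · rintro (⟨k, hk, hp⟩ | ⟨k, hk, hinf⟩)
      · exact ⟨k, hk, hp.isInfix⟩
      · exact ⟨k, hk, List.infix_cons_iff.mpr (Or.inr hinf)⟩
    · rintro ⟨k, hk, hinf⟩
      rcases List.infix_cons_iff.mp hinf with hp | hinf'
      · exact Or.inl ⟨k, hk, hp⟩
      · exact Or.inr ⟨k, hk, hinf'⟩

-- ===== VERDICT (by name: the statement is the Claim_ definition above) =====
theorem contains_any_py_spec : Claim_equal_contains_any_py := by
  intro text keywords _
  unfold Spec_contains_any_py contains_any_py contains_any_py_alt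
  set t := PySem.Chars.lower text.toList with ht
  have hne : ∀ k ∈ cleanKeywords keywords, k ≠ [] := by
    intro k hk
    have := List.of_mem_filter hk
    simpa [List.isEmpty_iff] using this
  by_cases hks : (cleanKeywords keywords).isEmpty
  · have hA : containsAnyGoA t keywords = false := by
      rw [containsAnyGoA_eq]
      simp [List.isEmpty_iff.mp hks]
    simp [hks, hA]
  · have hkw : ¬ keywords.isEmpty := by
      intro h
      rw [List.isEmpty_iff] at h
      simp [h, cleanKeywords] at hks
    simp only [hks, hkw, Bool.false_eq_true, if_false]
    rw [containsAnyGoA_eq]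
    by_cases hs : scanAny (cleanKeywords keywords) t = true
    · rw [hs]
      rcases (scanAny_eq_true_iff _ _ hne).mp hs with ⟨k, hk, hinf⟩
      simp only [List.any_eq_true]
      exact ⟨k, hk, (PySem.Chars.isIn_iff_infix k t).mpr hinf⟩
    · rw [Bool.not_eq_true] at hs
      rw [hs]
      simp only [List.any_eq_false]
      intro k hk
      rw [PySem.Chars.isIn_iff_infix]
      intro hinf
      have := (scanAny_eq_true_iff _ _ hne).mpr ⟨k, hk, hinf⟩
      simp [this] at hs
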